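-- pv_equiv track=rewrite | github.com/krishnakalyan3/Automodel | nemo_automodel/components/checkpoint/checkpointing.py | _equally_divide_layers
-- ===== SOURCE A (Python) =====
-- def _equally_divide_layers(num_shards: int, keys: list[str]) -> dict[str, int]:
--     """
--     Equally divide the state dict keys into num_shards shards.
--     """
--     if num_shards <= 0:
--         raise ValueError(f"num_shards must be > 0, got {num_shards}")
--
--     num_layers = len(keys)
--     if num_layers == 0:
--         return {}
--
--     layers_per_shard, remainder = divmod(num_layers, num_shards)
--     fqn_to_index_mapping: dict[str, int] = {}
--     start = 0
--     for shard_index in range(1, num_shards + 1):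
--         extra = 1 if shard_index <= remainder else 0
--         end = start + layers_per_shard + extra
--         for key in keys[start:end]:
--             fqn_to_index_mapping[key] = shard_index
--         start = end
--     return fqn_to_index_mapping
-- ===== SOURCE B (Python) =====
-- def _equally_divide_layers(num_shards: int, keys: list[str]) -> dict[str, int]:
--     """
--     Equally divide the state dict keys into num_shards shards.
--
--     Single pass over the keys: each key's shard index is computed directly by
--     arithmetic from its position, instead of looping over shards and slicing.
--     """
--     if num_shards <= 0:
--         raise ValueError(f"num_shards must be > 0, got {num_shards}")
--
--     layers_per_shard, remainder = divmod(len(keys), num_shards)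
--     boundary = remainder * (layers_per_shard + 1)
--     mapping: dict[str, int] = {}
--     for i, key in enumerate(keys):
--         if i < boundary:
--             mapping[key] = i // (layers_per_shard + 1) + 1
--         else:
--             mapping[key] = remainder + (i - boundary) // layers_per_shard + 1
--     return mapping
-- ===== Notes on version B (the rewrite author's own statement) =====
-- stated objective: alternative
-- what changed: Replaces the nested loop over shards with slicing of keys by a single enumerate pass over keys that computes each key's shard index directly by arithmetic from its position (boundary = remainder*(layers_per_shard+1)).
import Mathlib
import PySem

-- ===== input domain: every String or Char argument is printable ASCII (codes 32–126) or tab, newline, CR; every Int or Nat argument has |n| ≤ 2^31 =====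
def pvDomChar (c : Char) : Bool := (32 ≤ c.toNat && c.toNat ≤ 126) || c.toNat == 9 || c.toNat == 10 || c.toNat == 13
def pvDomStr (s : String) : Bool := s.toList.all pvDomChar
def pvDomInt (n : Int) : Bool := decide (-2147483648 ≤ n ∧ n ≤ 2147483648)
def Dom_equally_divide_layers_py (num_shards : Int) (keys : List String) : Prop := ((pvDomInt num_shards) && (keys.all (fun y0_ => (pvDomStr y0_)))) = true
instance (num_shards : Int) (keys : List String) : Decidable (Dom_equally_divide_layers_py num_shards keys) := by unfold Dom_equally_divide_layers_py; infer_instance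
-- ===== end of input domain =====

-- B replaces A's loop over shards with slicing by a single enumerate pass over keys
-- computing each key's shard index arithmetically (objective: alternative decomposition).

-- ===== PORT A =====
def equally_divide_layers_py (num_shards : Int) (keys : List String) : List (String × Int) :=
  if num_shards ≤ 0 then []  -- Python raises ValueError here; excluded by Pre_
  else if (keys.length : Int) = 0 then []
  else
    let layers_per_shard := PySem.Int.floordiv (keys.length : Int) num_shards
    let remainder := PySem.Int.mod (keys.length : Int) num_shards
    ((PySem.List.pyRange 1 (num_shards + 1) 1).foldl
      (fun (st : PySem.Dict String Int × Int) shard_index =>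
        let extra : Int := if shard_index ≤ remainder then 1 else 0
        let e := st.2 + layers_per_shard + extra
        ((PySem.List.slice keys (some st.2) (some e)).foldl
           (fun d key => d.insert key shard_index) st.1, e))
      (PySem.Dict.empty, 0)).1.items

-- ===== PORT B =====
-- the arithmetic shard index of the key at position i (B's if/else inside the loop)
def pvShardIdx (q r i : Int) : Int :=
  if i < r * (q + 1) then PySem.Int.floordiv i (q + 1) + 1
  else r + PySem.Int.floordiv (i - r * (q + 1)) q + 1

def equally_divide_layers_py_alt (num_shards : Int) (keys : List String) : List (String × Int) :=
  if num_shards ≤ 0 then []  -- Python raises ValueError here; excluded by Pre_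
  else
    let q := PySem.Int.floordiv (keys.length : Int) num_shards
    let r := PySem.Int.mod (keys.length : Int) num_shards
    ((PySem.List.enumerate keys 0).foldl
      (fun (d : PySem.Dict String Int) p => d.insert p.2 (pvShardIdx q r p.1))
      PySem.Dict.empty).items

-- ===== PRECONDITION & SPEC =====
-- Pre_ excludes exactly num_shards ≤ 0, where the Python A raises ValueError.
def Pre_equally_divide_layers_py (num_shards : Int) (keys : List String) : Prop :=
  0 < num_shards
instance (num_shards : Int) (keys : List String) : Decidable (Pre_equally_divide_layers_py num_shards keys) := by unfold Pre_equally_divide_layers_py; infer_instance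

def pvWitness_equally_divide_layers_py : Int × List String := (2, ["a", "b", "c"])

def Spec_equally_divide_layers_py (num_shards : Int) (keys : List String) (out : List (String × Int)) : Prop := out = equally_divide_layers_py_alt num_shards keys
instance (num_shards : Int) (keys : List String) (out : List (String × Int)) : Decidable (Spec_equally_divide_layers_py num_shards keys out) := by unfold Spec_equally_divide_layers_py; infer_instance

-- ===== CLAIM (what is proved, stated in full; the proofs are below) =====
def Claim_equal_equally_divide_layers_py : Prop := ∀ (num_shards : Int) (keys : List String), Dom_equally_divide_layers_py num_shards keys → Pre_equally_divide_layers_py num_shards keys → Spec_equally_divide_layers_py num_shards keys (equally_divide_layers_py num_shards keys)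

-- ===== LEMMAS AND PROOFS =====

-- Every position i in the j-th block (0-based block j, i.e. shard index j+1) gets shard j+1.
lemma pvShardIdx_block (q r j i : Nat) (h1 : j * q + min j r ≤ i)
    (h2 : i < (j + 1) * q + min (j + 1) r) :
    pvShardIdx (q : Int) (r : Int) (i : Int) = (j : Int) + 1 := by
  unfold pvShardIdx
  by_cases hc : j < r
  · have hm1 : min j r = j := by omega
    have hm2 : min (j + 1) r = j + 1 := by omega
    rw [hm1] at h1; rw [hm2] at h2
    have hlt : (i : Int) < (r : Int) * ((q : Int) + 1) := by
      have : i < r * (q + 1) := by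
        calc i < (j + 1) * q + (j + 1) := h2
        _ = (j + 1) * (q + 1) := by ring
        _ ≤ r * (q + 1) := Nat.mul_le_mul_right _ (by omega)
      exact_mod_cast this
    rw [if_pos hlt]
    have hq1 : ((q : Int) + 1) = ((q + 1 : Nat) : Int) := by push_cast; ring
    rw [hq1, PySem.Int.floordiv_natCast]
    have : i / (q + 1) = j := by
      apply Nat.div_eq_of_lt_le
      · calc j * (q + 1) = j * q + j := by ring
        _ ≤ i := h1
      · calc i < (j + 1) * q + (j + 1) := h2
        _ = (j + 1) * (q + 1) := by ring
    rw [this]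
  · have hm1 : min j r = r := by omega
    have hm2 : min (j + 1) r = r := by omega
    rw [hm1] at h1; rw [hm2] at h2
    rcases Nat.eq_zero_or_pos q with hq0 | hq0
    · exfalso; subst hq0; omega
    have hge : r * (q + 1) ≤ i := by
      calc r * (q + 1) = r * q + r := by ring
      _ ≤ j * q + r := by
        have := Nat.mul_le_mul_right q (show r ≤ j by omega); omega
      _ ≤ i := h1
    have hnlt : ¬ ((i : Int) < (r : Int) * ((q : Int) + 1)) := by
      rw [not_lt]
      have : ((r * (q + 1) : Nat) : Int) ≤ (i : Int) := by exact_mod_cast hge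
      push_cast at this; linarith
    rw [if_neg hnlt]
    have hsub : (i : Int) - (r : Int) * ((q : Int) + 1) = ((i - r * (q + 1) : Nat) : Int) := by
      have := hge; push_cast [this]; ring
    rw [hsub, PySem.Int.floordiv_natCast]
    have hrj : r ≤ j := by omega
    have hdiv : (i - r * (q + 1)) / q = j - r := by
      apply Nat.div_eq_of_lt_le
      · zify [hrj, hge]; nlinarith [h1]
      · zify [hrj, hge]; nlinarith [h2]
    rw [hdiv]
    push_cast [hrj]; ring

-- A fold over enumerate with a constant shard index collapses to a plain fold.
lemma foldl_enum_const (q r : Int) (c : Int) :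
    ∀ (l : List String) (a : Nat) (d : PySem.Dict String Int),
    (∀ i : Nat, a ≤ i → i < a + l.length → pvShardIdx q r (i : Int) = c) →
    (PySem.List.enumerate l (a : Int)).foldl
        (fun d p => d.insert p.2 (pvShardIdx q r p.1)) d
      = l.foldl (fun d key => d.insert key c) d := by
  intro l
  induction l with
  | nil => intro a d _; simp [PySem.List.enumerate_nil]
  | cons x xs ih =>
    intro a d h
    rw [PySem.List.enumerate_cons]
    simp only [List.foldl_cons]
    have hx : pvShardIdx q r (a : Int) = c :=
      h a le_rfl (by simp only [List.length_cons]; omega)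
    rw [hx]
    have hcast : ((a : Int) + 1) = ((a + 1 : Nat) : Int) := by push_cast; ring
    rw [hcast, ih (a + 1) _ (fun i hi1 hi2 =>
      h i (by omega) (by simp only [List.length_cons]; omega))]

-- Main loop invariant: A's remaining shard loop from shard j+1, started at
-- position j*q + min j r, equals B's enumerate fold over the remaining keys.
lemma loopA (keys : List String) (m q r : Nat) (hm : 0 < m)
    (hq : q = keys.length / m) (hr : r = keys.length % m) :
    ∀ (t j : Nat) (d : PySem.Dict String Int), j + t = m →
    ((PySem.List.pyRange ((j : Int) + 1) ((m : Int) + 1) 1).foldl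
      (fun (st : PySem.Dict String Int × Int) shard_index =>
        let extra : Int := if shard_index ≤ (r : Int) then 1 else 0
        let e := st.2 + (q : Int) + extra
        ((PySem.List.slice keys (some st.2) (some e)).foldl
           (fun d key => d.insert key shard_index) st.1, e))
      (d, ((j * q + min j r : Nat) : Int))).1
    = (PySem.List.enumerate (keys.drop (j * q + min j r)) ((j * q + min j r : Nat) : Int)).foldl
        (fun d p => d.insert p.2 (pvShardIdx (q : Int) (r : Int) p.1)) d := by
  intro t
  induction t with
  | zero =>
    intro j d hj
    have hj' : j = m := by omega
    subst hj'
    rw [PySem.List.pyRange_one_eq_nil (by omega)]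
    have hn : j * q + min j r = keys.length := by
      subst hq hr
      have h1 : keys.length % j < j := Nat.mod_lt _ hm
      have h2 : min j (keys.length % j) = keys.length % j := by omega
      rw [h2]
      exact Nat.div_add_mod keys.length j
    rw [hn]
    simp [PySem.List.enumerate_nil]
  | succ t ih =>
    intro j d hj
    have hjm : j < m := by omega
    set gj : Nat := j * q + min j r with hgj
    set gj1 : Nat := (j + 1) * q + min (j + 1) r with hgj1
    set Δ : Nat := q + (if j < r then 1 else 0) with hΔ
    have hstep : gj1 = gj + Δ := by
      by_cases hc : j < r
      · have e1 : min j r = j := by omega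
        have e2 : min (j + 1) r = j + 1 := by omega
        simp only [hgj, hgj1, hΔ, e1, e2, if_pos hc]; ring
      · have e1 : min j r = r := by omega
        have e2 : min (j + 1) r = r := by omega
        simp only [hgj, hgj1, hΔ, e1, e2, if_neg hc]; ring
    have hle : gj1 ≤ keys.length := by
      have h1 : r < m := by rw [hr]; exact Nat.mod_lt _ hm
      have hmq : m * q + r = keys.length := by
        rw [hq, hr]; exact Nat.div_add_mod keys.length m
      have hj1m : j + 1 ≤ m := hjm
      have := Nat.mul_le_mul_right q hj1m
      simp only [hgj1]; omega
    rw [PySem.List.pyRange_one_cons (by exact_mod_cast (by omega : (j : Int) + 1 < (m : Int) + 1))]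
    simp only [List.foldl_cons]
    have hend : ((gj : Nat) : Int) + (q : Int) + (if ((j : Int) + 1) ≤ (r : Int) then (1 : Int) else 0) = ((gj1 : Nat) : Int) := by
      split_ifs with h
      · have hd : Δ = q + 1 := by rw [hΔ, if_pos (show j < r by omega)]
        rw [hstep, hd]; push_cast; ring
      · have hd : Δ = q := by rw [hΔ, if_neg (show ¬ j < r by omega)]; ring
        rw [hstep, hd]; push_cast; ring
    rw [hend]
    have hslice : PySem.List.slice keys (some ((gj : Nat) : Int)) (some ((gj1 : Nat) : Int))
        = (keys.drop gj).take Δ := by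
      rw [PySem.List.slice_natCast, hstep]; congr 1; omega
    rw [hslice]
    have hnext : ((j : Int) + 1 + 1) = (((j + 1 : Nat) : Int) + 1) := by push_cast; ring
    rw [hnext]
    have := ih (j + 1) ((( keys.drop gj).take Δ).foldl (fun d key => d.insert key ((j : Int) + 1)) d) (by omega)
    simp only [← hgj1] at this
    rw [this]
    -- now split the RHS
    have hlen : ((keys.drop gj).take Δ).length = Δ := by
      rw [List.length_take, List.length_drop]; omega
    have hsplit : keys.drop gj = (keys.drop gj).take Δ ++ keys.drop gj1 := by
      conv_lhs => rw [← List.take_append_drop Δ (keys.drop gj)]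
      rw [List.drop_drop, hstep, Nat.add_comm]
    conv_rhs => rw [hsplit]
    rw [PySem.List.enumerate_append, List.foldl_append, hlen]
    have hcast : ((gj : Nat) : Int) + (Δ : Nat) = ((gj1 : Nat) : Int) := by
      rw [hstep]; push_cast; ring
    rw [hcast]
    congr 1
    refine (foldl_enum_const _ _ _ _ _ _ ?_).symm
    intro i hi1 hi2
    rw [hlen] at hi2
    exact pvShardIdx_block q r j i (by rw [← hgj]; omega) (by rw [← hgj1]; omega)

-- ===== VERDICT (by name: the statement is the Claim_ definition above) =====
theorem equally_divide_layers_py_spec : Claim_equal_equally_divide_layers_py := by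
  intro ns keys hdom hpre
  unfold Pre_equally_divide_layers_py at hpre
  unfold Spec_equally_divide_layers_py equally_divide_layers_py equally_divide_layers_py_alt
  have hns0 : ¬ ns ≤ 0 := not_le.mpr hpre
  rw [if_neg hns0, if_neg hns0]
  obtain ⟨m, rfl⟩ : ∃ m : Nat, ns = (m : Int) :=
    ⟨ns.toNat, (Int.toNat_of_nonneg hpre.le).symm⟩
  have hm : 0 < m := by exact_mod_cast hpre
  by_cases hk : keys = []
  · subst hk
    simp only [List.length_nil, Nat.cast_zero, if_pos, PySem.List.enumerate_nil,
      List.foldl_nil]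
    rfl
  · have hlen : ¬ ((keys.length : Int) = 0) := by
      simp only [Nat.cast_eq_zero, List.length_eq_zero_iff]
      exact hk
    rw [if_neg hlen]
    simp only [PySem.Int.floordiv_natCast, PySem.Int.mod_natCast]
    have hL := loopA keys m (keys.length / m) (keys.length % m) hm rfl rfl m 0
      PySem.Dict.empty (by omega)
    simp only [Nat.zero_mul, Nat.cast_zero, List.drop_zero, Nat.zero_min, zero_add] at hL
    exact congrArg PySem.Dict.items hL
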